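-- pv_equiv track=rewrite | github.com/rickykise/Crawling | crawling_dev/portal_kbs/portal_api.py | checkMaintitle_key
-- ===== SOURCE A (Python) =====
-- def checkMaintitle_key(title_key, newsKey):
--     returnValue = {
--         'r' : None
--     }
--
--     for s in newsKey.keys():
--         if title_key.find(s) != -1 :
--             returnValue['r'] = s
--
--     return returnValue
-- ===== SOURCE B (Python) =====
-- def checkMaintitle_key(title_key, newsKey):
--     # windowed substring index: hash every window of title_key whose length is a key
--     # length, then answer each key by one set lookup; the last matching key wins
--     lens = {len(s) for s in newsKey}
--     n = len(title_key)
--     subs = {title_key[i:i + l] for l in lens for i in range(n + 1)}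
--     hits = [s for s in newsKey if s in subs]
--     return {'r': hits[-1] if hits else None}
-- ===== Notes on version B (the rewrite author's own statement) =====
-- stated objective: faster
-- what changed: Instead of running a substring search of every key inside the title (A's K find-scans), B precomputes a hash set of all windows of the title whose length is one of the distinct key lengths, filters the keys by a single set lookup each, and returns the last element of the filtered list.
import Mathlib
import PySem

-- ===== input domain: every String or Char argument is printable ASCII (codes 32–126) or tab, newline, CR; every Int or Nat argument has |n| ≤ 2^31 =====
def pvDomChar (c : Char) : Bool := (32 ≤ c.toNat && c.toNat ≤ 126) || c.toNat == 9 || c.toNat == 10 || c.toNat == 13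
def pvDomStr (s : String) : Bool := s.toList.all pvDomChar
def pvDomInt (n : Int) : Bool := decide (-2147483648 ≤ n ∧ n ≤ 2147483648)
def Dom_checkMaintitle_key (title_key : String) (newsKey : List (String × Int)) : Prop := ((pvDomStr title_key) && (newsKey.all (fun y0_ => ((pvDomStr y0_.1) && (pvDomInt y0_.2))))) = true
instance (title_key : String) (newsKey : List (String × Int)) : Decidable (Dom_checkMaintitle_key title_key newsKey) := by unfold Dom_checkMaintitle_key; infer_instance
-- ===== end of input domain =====

-- B replaces A's per-key substring scans by a precomputed set of title windows (one per
-- key length and position) and a single set-lookup pass over the keys (objective: faster; measured).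

-- ===== PORT A =====
-- returnValue = {'r': None}; for s in newsKey.keys(): if title_key.find(s) != -1: returnValue['r'] = s; return returnValue
def checkMaintitle_key (title_key : String) (newsKey : List (String × Int)) : List (String × Option String) :=
  ((PySem.Dict.ofList newsKey).keys.foldl
    (fun (d : PySem.Dict String (Option String)) s =>
      if PySem.Str.find title_key s != -1 then d.insert "r" (some s) else d)
    (PySem.Dict.ofList [("r", (none : Option String))])).items

-- ===== PORT B =====
-- lens = {len(s) for s in newsKey}; n = len(title_key);
-- subs = {title_key[i:i+l] for l in lens for i in range(n+1)};
-- hits = [s for s in newsKey if s in subs]; return {'r': hits[-1] if hits else None}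
def checkMaintitle_key_alt (title_key : String) (newsKey : List (String × Int)) : List (String × Option String) :=
  let keys := (PySem.Dict.ofList newsKey).keys
  let lens : PySem.Set Int := PySem.Set.ofList (keys.map PySem.Str.len)
  let n := PySem.Str.len title_key
  let subs : PySem.Set String := PySem.Set.ofList
    (lens.flatMap (fun l => (PySem.List.pyRange 0 (n + 1) 1).map
      (fun i => PySem.Str.slice title_key (some i) (some (i + l)))))
  let hits := keys.filter (fun s => subs.contains s)
  [("r", PySem.List.pyGet? hits (-1))]

-- ===== PRECONDITION & SPEC =====
def Spec_checkMaintitle_key (title_key : String) (newsKey : List (String × Int)) (out : List (String × Option String)) : Prop := out = checkMaintitle_key_alt title_key newsKey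
instance (title_key : String) (newsKey : List (String × Int)) (out : List (String × Option String)) : Decidable (Spec_checkMaintitle_key title_key newsKey out) := by unfold Spec_checkMaintitle_key; infer_instance

-- ===== CLAIM (what is proved, stated in full; the proofs are below) =====
def Claim_equal_checkMaintitle_key : Prop := ∀ (title_key : String) (newsKey : List (String × Int)), Dom_checkMaintitle_key title_key newsKey → Spec_checkMaintitle_key title_key newsKey (checkMaintitle_key title_key newsKey)

-- ===== LEMMAS AND PROOFS =====

-- A's loop over a one-key dict {'r': r0} keeps the shape {'r': _}; its final value is the
-- last matching key, i.e. the first match of the reversed key list (or r0 if none).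
theorem pv_loopA (t : String) (l : List String) (r0 : Option String) :
    (l.foldl
      (fun (d : PySem.Dict String (Option String)) s =>
        if PySem.Str.find t s != -1 then d.insert "r" (some s) else d)
      (PySem.Dict.mk [("r", r0)])).items
    = [("r", (l.reverse.find? (fun s => PySem.Str.isIn s t)).or r0)] := by
  induction l generalizing r0 with
  | nil => simp
  | cons a l ih =>
    have hcond : (PySem.Str.find t a != -1) = PySem.Str.isIn a t := by
      by_cases h : (a.toList) <:+: (t.toList)
      · simp [PySem.Str.find_eq, PySem.Str.isIn_eq, (PySem.Chars.isIn_iff_infix _ _).mpr h,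
          bne_iff_ne, (PySem.Chars.find_ne_neg_one_iff _ _).mpr h]
      · simp [PySem.Str.find_eq, PySem.Str.isIn_eq, (PySem.Chars.isIn_eq_false_iff _ _).mpr h,
          (PySem.Chars.find_eq_neg_one_iff _ _).mpr h]
    have hins : (PySem.Dict.mk [("r", r0)]).insert "r" (some a)
        = PySem.Dict.mk [("r", some a)] := by simp [PySem.Dict.insert, PySem.Dict.contains]
    simp only [List.foldl_cons, hcond]
    by_cases h : PySem.Str.isIn a t
    · rw [if_pos h, hins, ih]
      rw [List.reverse_cons, List.find?_append, List.find?_cons_of_pos (p := fun s => PySem.Str.isIn s t) h,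
        Option.or_assoc, Option.some_or]
    · rw [if_neg h, ih]
      rw [List.reverse_cons, List.find?_append,
        List.find?_cons_of_neg (p := fun s => PySem.Str.isIn s t) (by simpa using h), List.find?_nil, Option.or_none]

-- the string s[a:b] as a list of chars
theorem pv_toList_slice (t : String) (a b : Option Int) :
    (PySem.Str.slice t a b).toList = PySem.List.slice t.toList a b := by
  simp [PySem.Str.slice]

-- membership in B's window set is exactly 'substring of the title', for any string whose
-- length occurs in the length list L (soundness needs 0 ≤ l for every l in L)
theorem pv_mem_subs (t s : String) (L : List Int) (hL : ∀ l ∈ L, 0 ≤ l)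
    (hs : PySem.Str.len s ∈ L) :
    s ∈ L.flatMap (fun l => (PySem.List.pyRange 0 (PySem.Str.len t + 1) 1).map
        (fun i => PySem.Str.slice t (some i) (some (i + l))))
      ↔ s.toList <:+: t.toList := by
  constructor
  · intro hmem
    obtain ⟨l, hl, hx⟩ := List.mem_flatMap.mp hmem
    obtain ⟨i, hi, rfl⟩ := List.mem_map.mp hx
    have hi0 : 0 ≤ i := (PySem.List.mem_pyRange_one.mp hi).1
    have hil : 0 ≤ i + l := by have := hL l hl; omega
    rw [pv_toList_slice, PySem.List.slice_toNat _ hi0 hil]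
    exact ((List.take_prefix _ _).isInfix).trans ((List.drop_suffix _ _).isInfix)
  · intro hinf
    obtain ⟨pre, post, heq⟩ := hinf
    apply List.mem_flatMap.mpr
    refine ⟨PySem.Str.len s, hs, ?_⟩
    apply List.mem_map.mpr
    refine ⟨(pre.length : Int), ?_, ?_⟩
    · apply PySem.List.mem_pyRange_one.mpr
      have : pre.length ≤ t.toList.length := by
        rw [← heq]; simp
      constructor
      · exact Int.natCast_nonneg _
      · rw [PySem.Str.len_eq]; omega
    · apply (String.toList_inj.mp · |>.symm) -- goal: slice = s; prove toList equal
      rw [pv_toList_slice, PySem.Str.len_eq,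
        PySem.List.slice_toNat _ (Int.natCast_nonneg _) (by positivity)]
      have h1 : ((pre.length : Int) + (s.toList.length : Int)).toNat = pre.length + s.toList.length := by
        omega
      have h2 : ((pre.length : Int)).toNat = pre.length := by omega
      rw [h1, h2, Nat.add_sub_cancel_left, ← heq, List.append_assoc, List.drop_left, List.take_left]

-- on every key of the dict, B's set lookup computes A's substring test
theorem pv_filter_eq (t : String) (keys : List String) :
    keys.filter (fun s =>
      (PySem.Set.ofList
        ((PySem.Set.ofList (keys.map PySem.Str.len) : List Int).flatMap
          (fun l => (PySem.List.pyRange 0 (PySem.Str.len t + 1) 1).map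
            (fun i => PySem.Str.slice t (some i) (some (i + l)))))).contains s)
    = keys.filter (fun s => PySem.Str.isIn s t) := by
  apply List.filter_congr
  intro s hsk
  have hL : ∀ l ∈ (PySem.Set.ofList (keys.map PySem.Str.len) : List Int), 0 ≤ l := by
    intro l hl
    have := (PySem.Set.mem_ofList _ _).mp hl
    obtain ⟨u, _, rfl⟩ := List.mem_map.mp this
    rw [PySem.Str.len_eq]; exact Int.natCast_nonneg _
  have hs : PySem.Str.len s ∈ (PySem.Set.ofList (keys.map PySem.Str.len) : List Int) :=
    (PySem.Set.mem_ofList _ _).mpr (List.mem_map.mpr ⟨s, hsk, rfl⟩)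
  rw [PySem.Set.contains_eq_decide]
  by_cases h : s.toList <:+: t.toList
  · rw [decide_eq_true ((PySem.Set.mem_ofList _ _).mpr ((pv_mem_subs t s _ hL hs).mpr h)),
      (PySem.Str.isIn_iff_infix s t).mpr h]
  · rw [decide_eq_false (fun hc => h ((pv_mem_subs t s _ hL hs).mp ((PySem.Set.mem_ofList _ _).mp hc)))]
    rcases hb : PySem.Str.isIn s t
    · rfl
    · exact absurd ((PySem.Str.isIn_iff_infix s t).mp hb) h

-- last element of the filtered list = first match of the reversed list
theorem pv_last_filter (p : String → Bool) (l : List String) :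
    PySem.List.pyGet? (l.filter p) (-1) = l.reverse.find? p := by
  rw [PySem.List.pyGet?_neg_one, List.getLast?_eq_head?_reverse, ← List.filter_reverse,
    List.head?_filter]

-- ===== VERDICT (by name: the statement is the Claim_ definition above) =====
theorem checkMaintitle_key_spec : Claim_equal_checkMaintitle_key := by
  intro t nk _
  unfold Spec_checkMaintitle_key checkMaintitle_key checkMaintitle_key_alt
  show ((PySem.Dict.ofList nk).keys.foldl _ (PySem.Dict.mk [("r", (none : Option String))])).items = _
  rw [pv_loopA]
  simp only []
  rw [pv_filter_eq, pv_last_filter, Option.or_none]
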